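-- pv_equiv track=rewrite | github.com/6arya6/Games_python | dotplot.py | separate_scores
-- ===== SOURCE A (Python) =====
-- def separate_scores(scores):
--     ones = []
--     twos = []
--     threes = []
--     fours = []
--     fives = []
--     for score in scores:
--         if int(score) == 1:
--             ones.append(score)
--         elif int(score) == 2:
--             twos.append(score)
--         elif int(score) == 3:
--             threes.append(score)
--         elif int(score) == 4:
--             fours.append(score)
--         elif int(score) == 5:
--             fives.append(score)
--     return [ones,twos,threes,fours,fives]
-- ===== SOURCE B (Python) =====
-- def separate_scores(scores):
--     return [[score for score in scores if int(score) == v] for v in range(1, 6)]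
-- ===== Notes on version B (the rewrite author's own statement) =====
-- stated objective: simpler
-- what changed: Replaces the single pass with five named accumulator lists and a five-way if/elif ladder by five staged filter passes, one comprehension per value v in 1..5; order within each bucket is preserved because each filter keeps input order.
import Mathlib
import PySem

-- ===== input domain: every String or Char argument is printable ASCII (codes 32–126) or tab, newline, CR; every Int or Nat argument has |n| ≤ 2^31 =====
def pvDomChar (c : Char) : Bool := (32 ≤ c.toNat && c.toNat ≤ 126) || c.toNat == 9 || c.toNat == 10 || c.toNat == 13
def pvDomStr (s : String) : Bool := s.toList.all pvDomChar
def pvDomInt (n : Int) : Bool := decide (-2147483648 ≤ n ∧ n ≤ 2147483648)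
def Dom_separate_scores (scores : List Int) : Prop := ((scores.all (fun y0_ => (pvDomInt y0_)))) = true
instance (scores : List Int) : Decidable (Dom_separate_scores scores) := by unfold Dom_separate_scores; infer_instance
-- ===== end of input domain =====

-- B replaces A's single pass with five named accumulators and an if/elif ladder
-- by five staged filter passes, one per value 1..5 (objective: simpler).


-- ===== PORT A =====
-- state: (ones, twos, threes, fours, fives); int(score) on an int is the identity
def separate_scores (scores : List Int) : List (List Int) :=
  let st := scores.foldl
    (fun (s : List Int × List Int × List Int × List Int × List Int) score =>
      let (ones, twos, threes, fours, fives) := s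
      if score = 1 then (ones ++ [score], twos, threes, fours, fives)
      else if score = 2 then (ones, twos ++ [score], threes, fours, fives)
      else if score = 3 then (ones, twos, threes ++ [score], fours, fives)
      else if score = 4 then (ones, twos, threes, fours ++ [score], fives)
      else if score = 5 then (ones, twos, threes, fours, fives ++ [score])
      else (ones, twos, threes, fours, fives))
    ([], [], [], [], [])
  [st.1, st.2.1, st.2.2.1, st.2.2.2.1, st.2.2.2.2]

-- ===== PORT B =====
-- outer comprehension over range(1, 6); inner comprehension = filter on int(score) == v
def separate_scores_alt (scores : List Int) : List (List Int) :=
  (PySem.List.pyRange 1 6 1).map (fun v => scores.filter (fun score => score = v))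

-- ===== PRECONDITION & SPEC =====
def Spec_separate_scores (scores : List Int) (out : List (List Int)) : Prop := out = separate_scores_alt scores
instance (scores : List Int) (out : List (List Int)) : Decidable (Spec_separate_scores scores out) := by unfold Spec_separate_scores; infer_instance

-- ===== CLAIM (what is proved, stated in full; the proofs are below) =====
def Claim_equal_separate_scores : Prop := ∀ (scores : List Int), Dom_separate_scores scores → Spec_separate_scores scores (separate_scores scores)

-- ===== LEMMAS AND PROOFS =====
-- invariant: A's fold starting from (a,b,c,d,e) appends each bucket's filter
theorem separate_scores_inv (scores : List Int) (a b c d e : List Int) :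
    scores.foldl
      (fun (s : List Int × List Int × List Int × List Int × List Int) score =>
        let (ones, twos, threes, fours, fives) := s
        if score = 1 then (ones ++ [score], twos, threes, fours, fives)
        else if score = 2 then (ones, twos ++ [score], threes, fours, fives)
        else if score = 3 then (ones, twos, threes ++ [score], fours, fives)
        else if score = 4 then (ones, twos, threes, fours ++ [score], fives)
        else if score = 5 then (ones, twos, threes, fours, fives ++ [score])
        else (ones, twos, threes, fours, fives))
      (a, b, c, d, e)
    = (a ++ scores.filter (fun x => x = (1 : Int)),
       b ++ scores.filter (fun x => x = (2 : Int)),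
       c ++ scores.filter (fun x => x = (3 : Int)),
       d ++ scores.filter (fun x => x = (4 : Int)),
       e ++ scores.filter (fun x => x = (5 : Int))) := by
  induction scores generalizing a b c d e with
  | nil => simp
  | cons x xs ih =>
    simp only [List.foldl_cons, List.filter_cons]
    by_cases h1 : x = 1
    · subst h1; simp [ih, List.append_assoc]
    · by_cases h2 : x = 2
      · subst h2; simp [ih, List.append_assoc]
      · by_cases h3 : x = 3
        · subst h3; simp [ih, List.append_assoc]
        · by_cases h4 : x = 4
          · subst h4; simp [ih, List.append_assoc]
          · by_cases h5 : x = 5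
            · subst h5; simp [ih, List.append_assoc]
            · simp [ih, h1, h2, h3, h4, h5]

-- ===== VERDICT (by name: the statement is the Claim_ definition above) =====
theorem separate_scores_spec : Claim_equal_separate_scores := by
  intro scores _
  unfold Spec_separate_scores separate_scores separate_scores_alt
  rw [separate_scores_inv]
  simp [PySem.List.pyRange]
  rfl
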